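-- pv_equiv track=rewrite | github.com/Erdem1111275/python_introductie | Opdrachten/gemaakteOpdrachten/opdracht7.py | calculate_score_per_student
-- ===== SOURCE A (Python) =====
-- def calculate_score_per_student(student):
--     score = 0
--
--     for result in student["resultaten"]:
--         if student["resultaten"][result] == "uitstekend":
--             score += 3
--         if student["resultaten"][result] == "goed":
--             score += 2
--         if student["resultaten"][result] == "voldoende":
--             score += 1
--
--     return score
-- ===== SOURCE B (Python) =====
-- def calculate_score_per_student(student):
--     # aggregate-then-weight: histogram of ratings, then a weighted sum over distinct ratings
--     counts = {}
--     for rating in student["resultaten"].values():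
--         counts[rating] = counts.get(rating, 0) + 1
--     weights = {"uitstekend": 3, "goed": 2, "voldoende": 1}
--     return sum(weights.get(r, 0) * c for r, c in counts.items())
-- ===== Notes on version B (the rewrite author's own statement) =====
-- stated objective: alternative
-- what changed: B first builds a frequency histogram of the rating strings and then computes the total as a weighted sum over the distinct ratings with a weights table, replacing A's per-result if-chain accumulation.
import Mathlib
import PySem

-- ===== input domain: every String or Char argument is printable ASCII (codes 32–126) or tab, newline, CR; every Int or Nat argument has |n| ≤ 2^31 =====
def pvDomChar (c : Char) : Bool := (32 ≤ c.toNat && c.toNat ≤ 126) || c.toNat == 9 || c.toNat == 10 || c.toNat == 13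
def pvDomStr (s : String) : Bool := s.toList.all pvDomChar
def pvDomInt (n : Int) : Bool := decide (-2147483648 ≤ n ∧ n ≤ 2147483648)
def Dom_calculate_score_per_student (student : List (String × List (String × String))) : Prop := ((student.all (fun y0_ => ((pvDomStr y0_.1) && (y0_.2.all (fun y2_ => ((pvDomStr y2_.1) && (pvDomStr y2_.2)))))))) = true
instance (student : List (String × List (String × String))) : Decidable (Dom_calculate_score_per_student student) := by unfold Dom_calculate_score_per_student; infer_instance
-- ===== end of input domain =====

-- B replaces A's per-result if-chain accumulation by a histogram of the rating strings
-- followed by a weighted sum over the distinct ratings (same cost, different shape).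

-- ===== PORT A =====
-- student["resultaten"] (first match; Pre_ guarantees presence and unique keys)
def pvResultaten (student : List (String × List (String × String))) : List (String × String) :=
  ((student.find? (fun p => p.1 == "resultaten")).getD ("", [])).2

def calculate_score_per_student (student : List (String × List (String × String))) : Int :=
  let res := pvResultaten student
  -- for result in student["resultaten"]: iterate the keys, look the value up each time
  (res.map Prod.fst).foldl (fun score result =>
    let v := ((res.find? (fun q => q.1 == result)).getD ("", "")).2
    let score := if v = "uitstekend" then score + 3 else score
    let score := if v = "goed" then score + 2 else score
    if v = "voldoende" then score + 1 else score) 0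

-- ===== PORT B =====
def calculate_score_per_student_alt (student : List (String × List (String × String))) : Int :=
  let res := pvResultaten student
  -- counts[rating] = counts.get(rating, 0) + 1 over the values
  let counts := (res.map Prod.snd).foldl
    (fun d x => d.insert x (d.getD x 0 + 1)) PySem.Dict.empty
  let weights : PySem.Dict String Int :=
    PySem.Dict.ofList [("uitstekend", 3), ("goed", 2), ("voldoende", 1)]
  -- sum(weights.get(r, 0) * c for r, c in counts.items())
  counts.items.foldl (fun t p => t + weights.getD p.1 0 * p.2) 0

-- ===== PRECONDITION & SPEC =====
-- Pre_ requires the "resultaten" key (A raises KeyError without it) and excludes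
-- association lists with duplicate keys, which no Python dict can represent, so the
-- first-match reading of such inputs is accidental.
def Pre_calculate_score_per_student (student : List (String × List (String × String))) : Prop :=
  (student.map Prod.fst).Nodup ∧ "resultaten" ∈ student.map Prod.fst ∧
    ∀ p ∈ student, (p.2.map Prod.fst).Nodup
instance (student : List (String × List (String × String))) : Decidable (Pre_calculate_score_per_student student) := by unfold Pre_calculate_score_per_student; infer_instance

def pvWitness_calculate_score_per_student : (List (String × List (String × String))) :=
  [("resultaten", [("wiskunde", "goed"), ("taal", "voldoende")])]

def Spec_calculate_score_per_student (student : List (String × List (String × String))) (out : Int) : Prop := out = calculate_score_per_student_alt student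
instance (student : List (String × List (String × String))) (out : Int) : Decidable (Spec_calculate_score_per_student student out) := by unfold Spec_calculate_score_per_student; infer_instance

-- ===== CLAIM (what is proved, stated in full; the proofs are below) =====
def Claim_equal_calculate_score_per_student : Prop := ∀ (student : List (String × List (String × String))), Dom_calculate_score_per_student student → Pre_calculate_score_per_student student → Spec_calculate_score_per_student student (calculate_score_per_student student)

-- ===== LEMMAS AND PROOFS =====

-- the weight a single rating contributes
def pvWeight (v : String) : Int :=
  if v = "uitstekend" then 3 else if v = "goed" then 2 else if v = "voldoende" then 1 else 0

-- the three weight strings are pairwise distinct, so A's if-chain adds exactly pvWeight v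
lemma a_step (s : Int) (v : String) :
    (let s1 := if v = "uitstekend" then s + 3 else s
     let s2 := if v = "goed" then s1 + 2 else s1
     if v = "voldoende" then s2 + 1 else s2) = s + pvWeight v := by
  simp only [pvWeight]
  split_ifs with h1 h2 h3 h2 h3 h3 <;> simp_all

-- with nodup keys, looking a key of res back up in res returns its own value
lemma lookup_self (res : List (String × String)) (h : (res.map Prod.fst).Nodup)
    (p : String × String) (hp : p ∈ res) :
    ((res.find? (fun q => q.1 == p.1)).getD ("", "")).2 = p.2 := by
  induction res with
  | nil => cases hp
  | cons a t ih =>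
    simp only [List.map_cons, List.nodup_cons] at h
    cases hp with
    | head =>
      rw [List.find?_cons_of_pos (by simp)]
      rfl
    | tail _ hp =>
      have hne : (a.1 == p.1) = false := by
        simp only [beq_eq_false_iff_ne]
        intro he
        exact h.1 (he ▸ (List.mem_map.mpr ⟨p, hp, rfl⟩))
      simp only [List.find?, hne]
      exact ih h.2 hp


-- A computes the sum of pvWeight over the values, given nodup keys
lemma a_eq_sum (res : List (String × String)) (h : (res.map Prod.fst).Nodup) :
    (res.map Prod.fst).foldl (fun score result =>
      let v := ((res.find? (fun q => q.1 == result)).getD ("", "")).2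
      let score := if v = "uitstekend" then score + 3 else score
      let score := if v = "goed" then score + 2 else score
      if v = "voldoende" then score + 1 else score) 0
    = ((res.map Prod.snd).map pvWeight).sum := by
  rw [List.foldl_map]
  have hc : res.foldl (fun score p =>
      let v := ((res.find? (fun q => q.1 == p.1)).getD ("", "")).2
      let s1 := if v = "uitstekend" then score + 3 else score
      let s2 := if v = "goed" then s1 + 2 else s1
      if v = "voldoende" then s2 + 1 else s2) 0
      = res.foldl (fun score p => score + pvWeight p.2) 0 := by
    apply PySem.List.foldl_congr_mem
    intro acc p hp
    rw [lookup_self res h p hp, a_step]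
  rw [hc, PySem.List.foldl_add, List.map_map]
  simp [Function.comp_def]

-- the literal weights dict looks up to pvWeight
lemma weights_getD (v : String) :
    (PySem.Dict.ofList [("uitstekend", 3), ("goed", 2), ("voldoende", 1)] :
      PySem.Dict String Int).getD v 0 = pvWeight v := by
  have hof : (PySem.Dict.ofList [("uitstekend", 3), ("goed", 2), ("voldoende", 1)] :
      PySem.Dict String Int)
      = ((PySem.Dict.empty.insert "uitstekend" 3).insert "goed" 2).insert "voldoende" 1 := rfl
  rw [hof]
  simp only [PySem.Dict.getD_insert, PySem.Dict.getD_empty, pvWeight]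
  split_ifs <;> simp_all

-- weighted sum over the distinct values times their multiplicities = plain sum of weights
lemma dedup_weighted (l : List String) (f : String → Int) :
    ((PySem.List.dedup l).map (fun k => f k * (l.count k : Int))).sum = (l.map f).sum := by
  have hfin : (PySem.List.dedup l).toFinset = l.toFinset := by
    ext x; simp
  have hd := Finset.sum_list_map_count (PySem.List.dedup l) (fun k => f k * (l.count k : Int))
  have hl := Finset.sum_list_map_count l f
  rw [hd, hl, hfin]
  apply Finset.sum_congr rfl
  intro x hx
  have hx1 : (PySem.List.dedup l).count x = 1 :=
    List.count_eq_one_of_mem (PySem.List.nodup_dedup l)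
      (by rw [← List.mem_toFinset, hfin] at *; simpa using hx)
  rw [hx1]
  simp [mul_comm]

-- B computes the same sum of pvWeight over the values
lemma b_eq_sum (res : List (String × String)) :
    calculate_score_per_student_alt [("resultaten", res)]
    = ((res.map Prod.snd).map pvWeight).sum := by
  show ((res.map Prod.snd).foldl
      (fun d x => d.insert x (d.getD x 0 + 1)) PySem.Dict.empty).items.foldl
      (fun t p => t + (PySem.Dict.ofList [("uitstekend", 3), ("goed", 2), ("voldoende", 1)] :
        PySem.Dict String Int).getD p.1 0 * p.2) 0
      = ((res.map Prod.snd).map pvWeight).sum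
  rw [PySem.Dict.foldl_insert_getD_add_one_eq_counter, PySem.Dict.items_counter,
    PySem.List.foldl_add]
  simp only [List.map_map, weights_getD, zero_add]
  have := dedup_weighted (res.map Prod.snd) pvWeight
  simpa using this

-- B only depends on student through pvResultaten
lemma b_resultaten (student : List (String × List (String × String))) :
    calculate_score_per_student_alt student
    = calculate_score_per_student_alt [("resultaten", pvResultaten student)] := by
  simp [calculate_score_per_student_alt, pvResultaten]

-- "resultaten" was found, and its pair is a member of student
lemma resultaten_mem (student : List (String × List (String × String)))
    (h : "resultaten" ∈ student.map Prod.fst) :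
    ("resultaten", pvResultaten student) ∈ student := by
  induction student with
  | nil => simp at h
  | cons a t ih =>
    by_cases ha : a.1 = "resultaten"
    · obtain ⟨k, r⟩ := a
      subst ha
      have hv : pvResultaten (("resultaten", r) :: t) = r := by
        simp [pvResultaten, List.find?]
      rw [hv]
      exact List.mem_cons_self
    · right
      simp only [List.map_cons, List.mem_cons] at h
      rcases h with h | h
      · exact absurd h.symm ha
      · have : pvResultaten (a :: t) = pvResultaten t := by
          simp [pvResultaten, List.find?, show (a.1 == "resultaten") = false by
            simpa using ha]
        rw [this]; exact ih h

-- ===== VERDICT (by name: the statement is the Claim_ definition above) =====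
theorem calculate_score_per_student_spec : Claim_equal_calculate_score_per_student := by
  intro student _ hpre
  obtain ⟨_, hmem, hnod⟩ := hpre
  show calculate_score_per_student student = calculate_score_per_student_alt student
  have hm := resultaten_mem student hmem
  have hres : ((pvResultaten student).map Prod.fst).Nodup :=
    hnod ("resultaten", pvResultaten student) hm
  rw [b_resultaten]
  show (let res := pvResultaten student
    (res.map Prod.fst).foldl (fun score result =>
      let v := ((res.find? (fun q => q.1 == result)).getD ("", "")).2
      let score := if v = "uitstekend" then score + 3 else score
      let score := if v = "goed" then score + 2 else score
      if v = "voldoende" then score + 1 else score) 0)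
    = calculate_score_per_student_alt [("resultaten", pvResultaten student)]
  rw [b_eq_sum, a_eq_sum _ hres]
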